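-- pv_equiv track=rewrite | github.com/tomlxq/ps_py | huawei/MaxSignDemo.py | func
-- ===== SOURCE A (Python) =====
-- def func(line: str) -> str:
--     max_len = 0
--     s = "-1"
--     cache = []
--     for c in line:
--         if cache and cache[-1] == c == '0':
--             line2 = ''.join(cache)
--             if "11" not in line2:
--                 max_len = max(max_len, len(line2))
--                 if max_len == len(line2):
--                     s = line2
--             cache = [c]
--         else:
--             cache.append(c)
--     return s
-- ===== SOURCE B (Python) =====
-- def func(line: str) -> str:
--     # Recursive decomposition driven by str.find("00"): peel off the segment
--     # before/at the first double zero, solve the remainder recursively, and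
--     # combine on the way out (later segments win ties).
--     best = _best(line)
--     return "-1" if best is None else best
--
-- def _best(line):
--     i = line.find("00")
--     if i == -1:
--         return None            # no cut: the whole string is the (excluded) last segment
--     head = line[:i + 1]
--     rest_best = _best(line[i + 1:])
--     if "11" in head:
--         return rest_best
--     if rest_best is not None and len(rest_best) >= len(head):
--         return rest_best
--     return head
-- ===== Notes on version B (the rewrite author's own statement) =====
-- stated objective: alternative
-- what changed: A makes one forward character pass with a mutable cache list and a running max folded into the loop; B is a recursive divide-and-combine: it locates the first double zero with str.find, peels off the segment ending there, recurses on the remainder, and combines results on the way back (later segments win ties), with no character loop or running maximum.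
import Mathlib
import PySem

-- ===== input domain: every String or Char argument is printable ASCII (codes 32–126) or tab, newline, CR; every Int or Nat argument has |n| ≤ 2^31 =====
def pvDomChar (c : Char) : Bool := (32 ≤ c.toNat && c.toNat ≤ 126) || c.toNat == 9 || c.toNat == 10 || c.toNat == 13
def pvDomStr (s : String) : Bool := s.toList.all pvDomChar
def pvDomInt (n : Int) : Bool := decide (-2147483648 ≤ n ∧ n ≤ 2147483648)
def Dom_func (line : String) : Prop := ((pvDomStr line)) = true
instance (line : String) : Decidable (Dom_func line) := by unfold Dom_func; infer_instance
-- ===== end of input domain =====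

-- B replaces A's single forward character loop (mutable cache + running max) by a recursive
-- divide-and-combine on str.find("00"): peel the segment at the first double zero, recurse on
-- the remainder, combine on the way out.  Objective: alternative decomposition (not faster).

-- ===== PORT A =====
-- loop body of A; state = (max_len, s, cache)
def aStep (st : Int × String × List Char) (c : Char) : Int × String × List Char :=
  match st with
  | (maxLen, s, cache) =>
    -- 'cache and cache[-1] == c == '0'': cache.getLast? = some c already implies cache ≠ []
    if cache.getLast? = some c ∧ c = '0' then
      let line2 := String.ofList cache          -- ''.join(cache)
      if PySem.Str.isIn "11" line2 = false then   -- "11" not in line2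
        let m := max maxLen (PySem.Str.len line2)
        (m, (if m = PySem.Str.len line2 then line2 else s), [c])
      else (maxLen, s, [c])
    else (maxLen, s, cache ++ [c])

def func (line : String) : String :=
  (line.toList.foldl aStep (0, "-1", [])).2.1

-- ===== PORT B =====
-- helper needed by bBest's termination proof (cited in decreasing_by)
lemma find00_drop_lt (l : List Char) (h : ¬ PySem.Chars.find l ['0', '0'] = -1) :
    (PySem.Chars.slice l (some (PySem.Chars.find l ['0', '0'] + 1)) none).length < l.length := by
  have hpos : 0 ≤ PySem.Chars.find l ['0', '0'] := by
    have := PySem.Chars.neg_one_le_find (s := l) (sub := ['0', '0'])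
    omega
  have hinf : ['0', '0'] <:+: l := (PySem.Chars.find_ne_neg_one_iff (s := l) (sub := ['0', '0'])).mp h
  have hlen : 2 ≤ l.length := by simpa using hinf.length_le
  rw [PySem.Chars.slice_eq_listSlice, PySem.List.slice_from _ (by omega)]
  simp only [List.length_drop]
  omega

-- _best(line): strings handled as char lists per the PySem convention
def bBest (l : List Char) : Option (List Char) :=
  if hne : PySem.Chars.find l ['0', '0'] = -1 then
    none                    -- no cut: the whole string is the (excluded) last segment
  else
    let i := PySem.Chars.find l ['0', '0']
    let head := PySem.Chars.slice l none (some (i + 1))              -- line[:i+1]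
    let restBest := bBest (PySem.Chars.slice l (some (i + 1)) none)  -- _best(line[i+1:])
    if PySem.Chars.isIn ['1', '1'] head then restBest
    else
      match restBest with
      | some b => if (head.length : Int) ≤ (b.length : Int) then some b else some head
      | none => some head
termination_by l.length
decreasing_by exact find00_drop_lt l hne

def func_alt (line : String) : String :=
  match bBest line.toList with
  | none => "-1"
  | some best => String.ofList best

-- ===== PRECONDITION & SPEC =====
def Spec_func (line : String) (out : String) : Prop := out = func_alt line
instance (line : String) (out : String) : Decidable (Spec_func line out) := by unfold Spec_func; infer_instance

-- ===== CLAIM (what is proved, stated in full; the proofs are below) =====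
def Claim_equal_func : Prop := ∀ (line : String), Dom_func line → Spec_func line (func line)

-- ===== LEMMAS AND PROOFS =====

-- A's flush update as a function of (max_len, s) and the flushed segment
def rStep (ms : Int × String) (seg : List Char) : Int × String :=
  if PySem.Chars.isIn ['1', '1'] seg then ms
  else (max ms.1 (seg.length : Int),
        if max ms.1 (seg.length : Int) = (seg.length : Int) then String.ofList seg else ms.2)

-- the same update with the filter removed and the tie test rewritten
def uStep (ms : Int × String) (seg : List Char) : Int × String :=
  (max ms.1 (seg.length : Int),
   if ms.1 ≤ (seg.length : Int) then String.ofList seg else ms.2)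

-- reference segmentation loop (used only in the proofs, to bridge A's fold and B's recursion);
-- state = (segments, prev)
def bAppendLast (segs : List (List Char)) (c : Char) : List (List Char) :=
  segs.dropLast ++ [(segs.getLast?.getD []) ++ [c]]

def bStep (st : List (List Char) × List Char) (c : Char) : List (List Char) × List Char :=
  match st with
  | (segments, prev) =>
    (if prev = ['0'] ∧ c = '0' then segments ++ [[c]] else bAppendLast segments c, [c])

def segsOf (l : List Char) : List (List Char) := (l.foldl bStep ([[]], [])).1

def candOf (l : List Char) : List (List Char) :=
  (segsOf l).dropLast.filter (fun seg => ! PySem.Chars.isIn ['1', '1'] seg)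

-- last character of u as a one-element prev list (prev if u is empty)
def lastPrev (prev u : List Char) : List Char :=
  match u.getLast? with
  | none => prev
  | some d => [d]

-- invariant linking A's cache with the reference loop's prev
def Compat (cache prev : List Char) : Prop :=
  (cache = [] ∧ prev = []) ∨ ∃ d t, prev = [d] ∧ cache = t ++ [d]

lemma aStep_flush (maxLen : Int) (s : String) (cache : List Char) (c : Char)
    (h : cache.getLast? = some c ∧ c = '0') :
    aStep (maxLen, s, cache) c
      = ((rStep (maxLen, s) cache).1, (rStep (maxLen, s) cache).2, [c]) := by
  simp only [aStep, rStep, if_pos h, PySem.Str.isIn_eq, PySem.Str.len_eq,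
    String.toList_ofList]
  cases hIn : PySem.Chars.isIn "11".toList cache
  · simp [show ("11".toList : List Char) = ['1', '1'] from rfl] at hIn
    simp [hIn]
  · simp [show ("11".toList : List Char) = ['1', '1'] from rfl] at hIn
    simp [hIn]

lemma bfold_ne_nil : ∀ (chars : List Char) (segs : List (List Char)) (prev : List Char),
    segs ≠ [] → (chars.foldl bStep (segs, prev)).1 ≠ [] := by
  intro chars
  induction chars with
  | nil => intro segs prev h; simpa using h
  | cons c rest ih =>
    intro segs prev h
    simp only [List.foldl_cons, bStep]
    split
    · exact ih _ _ (by simp)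
    · exact ih _ _ (by simp [bAppendLast])

lemma bfold_shift : ∀ (chars : List Char) (pre : List (List Char)) (cur prev : List Char),
    chars.foldl bStep (pre ++ [cur], prev)
      = (pre ++ (chars.foldl bStep ([cur], prev)).1, (chars.foldl bStep ([cur], prev)).2) := by
  intro chars
  induction chars with
  | nil => intro pre cur prev; simp
  | cons c rest ih =>
    intro pre cur prev
    simp only [List.foldl_cons, bStep]
    split
    · rw [ih (pre ++ [cur]) [c] [c], ih [cur] [c] [c]]
      simp
    · have hA : bAppendLast (pre ++ [cur]) c = pre ++ [cur ++ [c]] := by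
        simp [bAppendLast]
      have hB : bAppendLast [cur] c = [cur ++ [c]] := by
        simp [bAppendLast]
      rw [hA, hB, ih pre (cur ++ [c]) [c]]

lemma main_fold : ∀ (chars : List Char) (cache prev : List Char) (maxLen : Int) (s : String),
    Compat cache prev →
    (chars.foldl aStep (maxLen, s, cache)).2.1
      = (((chars.foldl bStep ([cache], prev)).1.dropLast).foldl rStep (maxLen, s)).2 := by
  intro chars
  induction chars with
  | nil => intro cache prev maxLen s _; simp
  | cons c rest ih =>
    intro cache prev maxLen s hcomp
    have hiff : (cache.getLast? = some c ∧ c = '0') ↔ (prev = ['0'] ∧ c = '0') := by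
      rcases hcomp with ⟨hc, hp⟩ | ⟨d, t, hp, hc⟩
      · subst hc; subst hp; simp
      · subst hp; subst hc
        simp only [List.getLast?_concat, Option.some.injEq, List.cons.injEq, and_true]
        constructor
        · rintro ⟨rfl, rfl⟩; exact ⟨rfl, rfl⟩
        · rintro ⟨rfl, rfl⟩; exact ⟨rfl, rfl⟩
    by_cases hcond : prev = ['0'] ∧ c = '0'
    · -- flush branch on both sides
      have hAc : cache.getLast? = some c ∧ c = '0' := hiff.mpr hcond
      simp only [List.foldl_cons, bStep, if_pos hcond, aStep_flush maxLen s cache c hAc]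
      have hLne : (rest.foldl bStep ([[c]], [c])).1 ≠ [] := bfold_ne_nil rest [[c]] [c] (by simp)
      rw [ih [c] [c] (rStep (maxLen, s) cache).1 (rStep (maxLen, s) cache).2
            (Or.inr ⟨c, [], rfl, rfl⟩)]
      rw [bfold_shift rest [cache] [c] [c]]
      simp only [List.singleton_append, List.dropLast_cons_of_ne_nil hLne, List.foldl_cons]
    · -- append branch on both sides
      have hAc : ¬ (cache.getLast? = some c ∧ c = '0') := fun h => hcond (hiff.mp h)
      have hB : bAppendLast [cache] c = [cache ++ [c]] := by simp [bAppendLast]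
      simp only [List.foldl_cons, bStep, if_neg hcond, aStep, if_neg hAc, hB]
      exact ih (cache ++ [c]) [c] maxLen s (Or.inr ⟨c, cache, rfl, rfl⟩)

lemma rStep_filter : ∀ (l : List (List Char)) (ms : Int × String),
    l.foldl rStep ms
      = (l.filter (fun seg => ! PySem.Chars.isIn ['1', '1'] seg)).foldl uStep ms := by
  intro l
  induction l with
  | nil => intro ms; rfl
  | cons seg rest ih =>
    intro ms
    by_cases h : PySem.Chars.isIn ['1', '1'] seg = true
    · rw [List.foldl_cons, List.filter_cons, if_neg (by simp [h]),
         show rStep ms seg = ms from by rw [rStep, if_pos h]]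
      exact ih ms
    · rw [List.foldl_cons, List.filter_cons, if_pos (by simp [h]), List.foldl_cons,
         show rStep ms seg = uStep ms seg from by
           rw [rStep, if_neg h, uStep]
           exact Prod.ext rfl (if_congr max_eq_right_iff rfl rfl)]
      exact ih (uStep ms seg)

lemma max?_snoc (l : List (List Char)) (a : List Char) :
    PySem.List.max? (l ++ [a]) (fun seg => (seg.length : Int))
      = some (match PySem.List.max? l (fun seg => (seg.length : Int)) with
              | none => a
              | some b => if (b.length : Int) < (a.length : Int) then a else b) := by
  rcases hfold : PySem.List.max? l (fun seg => ((seg.length : Int))) with _ | b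
  · unfold PySem.List.max? at hfold ⊢
    rw [List.foldl_append, hfold]
    simp
  · unfold PySem.List.max? at hfold ⊢
    rw [List.foldl_append, hfold]
    simp only [List.foldl_cons, List.foldl_nil]
    split <;> rfl

lemma uStep_fold : ∀ (cands : List (List Char)) (m : Int) (s : String),
    cands.foldl uStep (m, s)
      = (cands.foldl (fun a seg => max a (seg.length : Int)) m,
         match PySem.List.max? cands.reverse (fun seg => (seg.length : Int)) with
         | none => s
         | some x => if m ≤ (x.length : Int) then String.ofList x else s) := by
  intro cands
  induction cands with
  | nil => intro m s; simp [PySem.List.max?]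
  | cons seg rest ih =>
    intro m s
    simp only [List.foldl_cons, List.reverse_cons, max?_snoc]
    rw [show uStep (m, s) seg
          = (max m (seg.length : Int), if m ≤ (seg.length : Int) then String.ofList seg else s)
        from rfl]
    rw [ih (max m (seg.length : Int)) (if m ≤ (seg.length : Int) then String.ofList seg else s)]
    cases h : PySem.List.max? rest.reverse (fun seg => ((seg.length : Int))) with
    | none =>
      have : rest.reverse = [] := (PySem.List.max?_eq_none_iff _ _).mp h
      have hr : rest = [] := by simpa using this
      subst hr
      simp
    | some b =>
      simp only
      by_cases hbn : (b.length : Int) < (seg.length : Int)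
      · rw [if_pos hbn]
        have h1 : ¬ (max m (seg.length : Int) ≤ (b.length : Int)) := by omega
        rw [if_neg h1]
      · rw [if_neg hbn]
        by_cases hm : max m (seg.length : Int) ≤ (b.length : Int)
        · rw [if_pos hm, if_pos (by omega : m ≤ (b.length : Int))]
        · by_cases hms : m ≤ ((seg.length : Int))
          · exfalso; omega
          · rw [if_neg hm, if_neg (by omega : ¬ m ≤ ((b.length : Int))), if_neg hms]

-- ===== B-side lemmas =====

-- the reference loop on a cut-free block just extends the last segment
lemma fold_nocut : ∀ (u : List Char) (pre : List (List Char)) (seg prev : List Char),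
    ¬ (['0', '0'] <:+: (prev ++ u)) →
    u.foldl bStep (pre ++ [seg], prev) = (pre ++ [seg ++ u], lastPrev prev u) := by
  intro u
  induction u with
  | nil => intro pre seg prev _; simp [lastPrev]
  | cons c u' ih =>
    intro pre seg prev h
    have hcut : ¬ (prev = ['0'] ∧ c = '0') := by
      rintro ⟨rfl, rfl⟩
      exact h ⟨[], u', by simp⟩
    have hA : bAppendLast (pre ++ [seg]) c = pre ++ [seg ++ [c]] := by
      simp [bAppendLast]
    have h' : ¬ (['0', '0'] <:+: ([c] ++ u')) := fun hin =>
      h (hin.trans (List.suffix_append prev (c :: u')).isInfix)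
    simp only [List.foldl_cons, bStep, if_neg hcut, hA]
    rw [ih pre (seg ++ [c]) [c] h']
    have hl : lastPrev [c] u' = lastPrev prev (c :: u') := by
      cases u' with
      | nil => simp [lastPrev]
      | cons d t =>
        simp only [lastPrev]
        cases hg : (d :: t).getLast? with
        | none => simp at hg
        | some e => rw [List.getLast?_cons_cons, hg]
    simp [hl]

-- decompose the reference segmentation at the first "00"
lemma segsOf_split (l : List Char) (n : Nat)
    (hpre : ['0', '0'] <+: l.drop n)
    (hmin : ∀ j, j < n → ¬ (['0', '0'] <+: l.drop j)) :
    segsOf l = l.take (n + 1) :: segsOf (l.drop (n + 1)) := by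
  obtain ⟨t, ht⟩ := hpre
  have hlen : n + 2 ≤ l.length := by
    have := congrArg List.length ht
    simp [List.length_drop] at this
    omega
  have hulen : (l.take (n + 1)).length = n + 1 := by
    simp [List.length_take]; omega
  have hlast : (l.take (n + 1)).getLast? = some '0' := by
    rw [List.getLast?_eq_getElem?, hulen]
    simp only [Nat.add_sub_cancel, List.getElem?_take]
    rw [if_pos (by omega)]
    have h0 : (l.drop n)[0]? = some '0' := by rw [← ht]; rfl
    rw [List.getElem?_drop] at h0
    simpa using h0
  have hnotin : ¬ (['0', '0'] <:+: (([] : List Char) ++ l.take (n + 1))) := by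
    simp only [List.nil_append]
    intro hin
    obtain ⟨j, hj⟩ := (PySem.Chars.exists_prefix_drop_iff_isIn ['0', '0'] (l.take (n + 1))).mpr
      ((PySem.Chars.isIn_iff_infix _ _).mpr hin)
    have hjlen : 2 ≤ ((l.take (n + 1)).drop j).length := hj.length_le
    have hjn : j < n := by
      rw [List.length_drop, hulen] at hjlen; omega
    refine hmin j hjn ?_
    have hdt : (l.take (n + 1)).drop j = (l.drop j).take (n + 1 - j) := by
      rw [List.drop_take]
    exact hj.trans (hdt ▸ List.take_prefix _ _)
  have hdrop : l.drop (n + 1) = '0' :: t := by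
    have : l.drop (n + 1) = (l.drop n).tail := by rw [List.tail_drop]
    rw [this, ← ht]; rfl
  have hsplit := List.take_append_drop (n + 1) l
  calc segsOf l = ((l.take (n + 1) ++ l.drop (n + 1)).foldl bStep ([[]], [])).1 := by
        rw [hsplit]; rfl
    _ = l.take (n + 1) :: segsOf (l.drop (n + 1)) := by
        rw [List.foldl_append]
        rw [show ([[]], ([] : List Char)) = (([] : List (List Char)) ++ [[]], ([] : List Char)) from rfl]
        rw [fold_nocut _ _ _ _ hnotin]
        simp only [List.nil_append, lastPrev, hlast]
        rw [hdrop]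
        have hstep : bStep ([l.take (n + 1)], ['0']) '0'
            = ([l.take (n + 1)] ++ [['0']], ['0']) := by
          simp [bStep]
        have hstep0 : bStep ([[]], ([] : List Char)) '0' = ([['0']], ['0']) := by
          simp [bStep, bAppendLast]
        simp only [List.foldl_cons, hstep]
        rw [bfold_shift t [l.take (n + 1)] ['0'] ['0']]
        simp [segsOf, hstep0]

-- B's recursion computes the first extremal candidate of the reversed candidate list
lemma bBest_eq (l : List Char) :
    bBest l = PySem.List.max? (candOf l).reverse (fun seg => (seg.length : Int)) := by
  suffices H : ∀ (N : Nat) (l : List Char), l.length ≤ N →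
      bBest l = PySem.List.max? (candOf l).reverse (fun seg => (seg.length : Int)) from
    H l.length l le_rfl
  intro N
  induction N with
  | zero =>
    intro l hl
    have : l = [] := List.length_eq_zero_iff.mp (Nat.le_zero.mp hl)
    subst this
    rw [bBest]
    rfl
  | succ N ih =>
    intro l hl
    by_cases hfind : PySem.Chars.find l ['0', '0'] = -1
    · -- no "00": the whole string is the single (excluded) segment
      have hninf : ¬ (['0', '0'] <:+: l) :=
        (PySem.Chars.find_eq_neg_one_iff (s := l) (sub := ['0', '0'])).mp hfind
      have hsegs : segsOf l = [l] := by
        have := fold_nocut l [] [] [] (by simpa using hninf)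
        simpa [segsOf] using congrArg Prod.fst this
      rw [bBest, dif_pos hfind]
      simp [candOf, hsegs, PySem.List.max?]
    · have hpos : 0 ≤ PySem.Chars.find l ['0', '0'] := by
        have := PySem.Chars.neg_one_le_find (s := l) (sub := ['0', '0'])
        omega
      set i := PySem.Chars.find l ['0', '0'] with hidef
      set n := i.toNat with hndef
      obtain ⟨hat, hfirst⟩ := PySem.Chars.find_spec (s := l) (sub := ['0', '0']) hpos
      have hsegs := segsOf_split l n hat (fun j hj => hfirst j hj)
      have hto : (i + 1).toNat = n + 1 := by omega
      have h1 : (0 : Int) ≤ i + 1 := by omega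
      have hheadeq : PySem.Chars.slice l none (some (i + 1)) = l.take (n + 1) := by
        rw [PySem.Chars.slice_eq_listSlice, PySem.List.slice_to _ h1, hto]
      have hresteq : PySem.Chars.slice l (some (i + 1)) none = l.drop (n + 1) := by
        rw [PySem.Chars.slice_eq_listSlice, PySem.List.slice_from _ h1, hto]
      have hlenrest : (l.drop (n + 1)).length ≤ N := by
        simp only [List.length_drop]
        have hinfx : ['0', '0'] <:+: l :=
          (PySem.Chars.find_ne_neg_one_iff (s := l) (sub := ['0', '0'])).mp hfind
        have : 2 ≤ l.length := by simpa using hinfx.length_le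
        omega
      have hih := ih (l.drop (n + 1)) hlenrest
      have hnn : segsOf (l.drop (n + 1)) ≠ [] := by
        unfold segsOf
        exact bfold_ne_nil _ _ _ (by simp)
      rw [bBest, dif_neg hfind]
      simp only [← hidef, hheadeq, hresteq, hih]
      have hcand : (candOf l).reverse
          = (candOf (l.drop (n + 1))).reverse
            ++ (if PySem.Chars.isIn ['1', '1'] (l.take (n + 1)) then [] else [l.take (n + 1)]) := by
        simp only [candOf, hsegs, List.dropLast_cons_of_ne_nil hnn, List.filter_cons]
        by_cases h11 : PySem.Chars.isIn ['1', '1'] (l.take (n + 1))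
        · simp [h11]
        · simp [h11]
      by_cases h11 : PySem.Chars.isIn ['1', '1'] (l.take (n + 1))
      · rw [if_pos h11, hcand, if_pos h11]
        simp
      · rw [if_neg h11, hcand, if_neg h11, max?_snoc]
        cases hmax : PySem.List.max? (candOf (l.drop (n + 1))).reverse
            (fun seg => ((seg.length : Int))) with
        | none => simp
        | some b =>
          simp only
          by_cases hle : ((l.take (n + 1)).length : Int) ≤ (b.length : Int)
          · rw [if_pos hle, if_neg (by omega)]
          · rw [if_neg hle, if_pos (by omega)]

-- ===== VERDICT (by name: the statement is the Claim_ definition above) =====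
theorem func_spec : Claim_equal_func := by
  intro line _
  unfold Spec_func func func_alt
  rw [main_fold line.toList [] [] 0 "-1" (Or.inl ⟨rfl, rfl⟩)]
  rw [rStep_filter, uStep_fold, bBest_eq]
  cases h : PySem.List.max? (candOf line.toList).reverse (fun seg => ((seg.length : Int))) with
  | none => simp only [candOf, segsOf] at h; simp only [h]
  | some best =>
    simp only [candOf, segsOf] at h
    simp only [h]
    rw [if_pos (by exact_mod_cast Int.natCast_nonneg best.length)]
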